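-- pv_equiv track=rewrite | github.com/oguzhankir/omnichunk | src/omnichunk/engine/markup_engine.py | _find_json_value_end
-- ===== SOURCE A (Python) =====
-- def _find_json_value_end(content: str, idx: int) -> int:
--     depth_curly = 0
--     depth_square = 0
--     in_string = False
--     escape = False
--
--     for pos in range(idx, len(content)):
--         ch = content[pos]
--         if in_string:
--             if escape:
--                 escape = False
--                 continue
--             if ch == "\\":
--                 escape = True
--                 continue
--             if ch == '"':
--                 in_string = False
--             continue
--
--         if ch == '"':
--             in_string = True
--         elif ch == "{":
--             depth_curly += 1
--         elif ch == "}":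
--             if depth_curly == 0 and depth_square == 0:
--                 return pos
--             depth_curly = max(0, depth_curly - 1)
--         elif ch == "[":
--             depth_square += 1
--         elif ch == "]":
--             depth_square = max(0, depth_square - 1)
--         elif ch == "," and depth_curly == 0 and depth_square == 0:
--             return pos + 1
--
--     return len(content)
-- ===== SOURCE B (Python) =====
-- def _find_json_value_end(content: str, idx: int) -> int:
--     n = len(content)
--
--     # Pass 1: tokenize — collect the top-level structural characters as
--     # (position, char) events, dropping everything inside string literals.
--     events = []
--     state = 0  # 0 = normal, 1 = in string, 2 = just saw backslash in string
--     for pos in range(idx, n):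
--         ch = content[pos]
--         if state == 2:
--             state = 1
--         elif state == 1:
--             if ch == "\\":
--                 state = 2
--             elif ch == '"':
--                 state = 0
--         elif ch == '"':
--             state = 1
--         elif ch in "{}[],":
--             events.append((pos, ch))
--
--     # Pass 2: fold over the event list maintaining the two depths.
--     dc = 0
--     ds = 0
--     for pos, ch in events:
--         if ch == "{":
--             dc += 1
--         elif ch == "}":
--             if dc == 0 and ds == 0:
--                 return pos
--             dc = max(0, dc - 1)
--         elif ch == "[":
--             ds += 1
--         elif ch == "]":
--             ds = max(0, ds - 1)
--         elif dc == 0 and ds == 0:  # ","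
--             return pos + 1
--     return n
-- ===== Notes on version B (the rewrite author's own statement) =====
-- stated objective: alternative
-- what changed: Replaces A's single intertwined pass (depths + in_string/escape flags + early returns in one loop) by two staged passes: a tokenizer that first builds the list of top-level structural (pos, char) events with string literals stripped, then a separate fold over that event list that maintains the depths and decides the return point.
import Mathlib
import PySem

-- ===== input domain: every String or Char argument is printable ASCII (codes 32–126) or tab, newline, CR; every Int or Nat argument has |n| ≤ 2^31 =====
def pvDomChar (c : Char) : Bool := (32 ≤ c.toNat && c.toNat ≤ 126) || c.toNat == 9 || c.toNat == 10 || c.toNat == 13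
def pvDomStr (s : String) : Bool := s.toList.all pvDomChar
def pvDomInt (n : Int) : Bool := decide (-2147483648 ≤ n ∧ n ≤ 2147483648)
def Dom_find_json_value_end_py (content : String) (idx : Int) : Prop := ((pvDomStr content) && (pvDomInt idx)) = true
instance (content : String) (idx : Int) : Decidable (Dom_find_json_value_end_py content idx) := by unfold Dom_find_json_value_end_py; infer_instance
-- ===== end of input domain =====

-- B replaces A's single intertwined scan by two staged passes: a tokenizer building the list of
-- top-level structural (pos, char) events with string literals stripped, then a separate fold over
-- that list maintaining the depths (alternative decomposition; same asymptotic cost).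
-- Equivalence is proved on Pre_ (idx ≥ -len(content)); outside it both Pythons raise IndexError.

-- ===== PORT A =====
-- for pos in range(idx, len(content)) is run at most (n - idx) times; fuel counts the remaining
-- iterations. pyGet? models content[pos]; none (IndexError) is outside Pre_.
def aLoop (cs : List Char) (n : Int) : Nat → Int → Int → Int → Bool → Bool → Int
  | 0, _, _, _, _, _ => n
  | fuel+1, pos, dc, ds, instr, esc =>
    if pos < n then
      match PySem.List.pyGet? cs pos with
      | none => 0
      | some ch =>
        if instr then
          if esc then aLoop cs n fuel (pos+1) dc ds true false
          else if ch = '\\' then aLoop cs n fuel (pos+1) dc ds true true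
          else if ch = '"' then aLoop cs n fuel (pos+1) dc ds false false
          else aLoop cs n fuel (pos+1) dc ds true false
        else if ch = '"' then aLoop cs n fuel (pos+1) dc ds true false
        else if ch = '{' then aLoop cs n fuel (pos+1) (dc+1) ds false false
        else if ch = '}' then
          if dc = 0 ∧ ds = 0 then pos
          else aLoop cs n fuel (pos+1) (max 0 (dc-1)) ds false false
        else if ch = '[' then aLoop cs n fuel (pos+1) dc (ds+1) false false
        else if ch = ']' then aLoop cs n fuel (pos+1) dc (max 0 (ds-1)) false false
        else if ch = ',' ∧ dc = 0 ∧ ds = 0 then pos + 1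
        else aLoop cs n fuel (pos+1) dc ds false false
    else n

def find_json_value_end_py (content : String) (idx : Int) : Int :=
  let cs := content.toList
  aLoop cs (cs.length : Int) ((cs.length : Int) - idx).toNat idx 0 0 false false

-- ===== PORT B =====
-- pass 1: tokenize — collect top-level structural (pos, ch) events, dropping string literals;
-- state: 0 = normal, 1 = in string, 2 = just saw backslash in string
def bScan (cs : List Char) (n : Int) : Nat → Int → Int → List (Int × Char)
  | 0, _, _ => []
  | fuel+1, pos, state =>
    if pos < n then
      match PySem.List.pyGet? cs pos with
      | none => []
      | some ch =>
        if state = 2 then bScan cs n fuel (pos+1) 1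
        else if state = 1 then
          if ch = '\\' then bScan cs n fuel (pos+1) 2
          else if ch = '"' then bScan cs n fuel (pos+1) 0
          else bScan cs n fuel (pos+1) 1
        else if ch = '"' then bScan cs n fuel (pos+1) 1
        else if ch = '{' ∨ ch = '}' ∨ ch = '[' ∨ ch = ']' ∨ ch = ',' then
          (pos, ch) :: bScan cs n fuel (pos+1) 0
        else bScan cs n fuel (pos+1) 0
    else []

-- pass 2: fold over the event list maintaining the two depths
def bFold (n : Int) : List (Int × Char) → Int → Int → Int
  | [], _, _ => n
  | (pos, ch) :: rest, dc, ds =>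
    if ch = '{' then bFold n rest (dc+1) ds
    else if ch = '}' then
      if dc = 0 ∧ ds = 0 then pos else bFold n rest (max 0 (dc-1)) ds
    else if ch = '[' then bFold n rest dc (ds+1)
    else if ch = ']' then bFold n rest dc (max 0 (ds-1))
    else if dc = 0 ∧ ds = 0 then pos + 1
    else bFold n rest dc ds

def find_json_value_end_py_alt (content : String) (idx : Int) : Int :=
  let cs := content.toList
  bFold (cs.length : Int) (bScan cs (cs.length : Int) ((cs.length : Int) - idx).toNat idx 0) 0 0

-- ===== PRECONDITION & SPEC =====
-- Pre_ excludes exactly the inputs where A raises IndexError (idx < -len(content)); A returns on all others.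
def Pre_find_json_value_end_py (content : String) (idx : Int) : Prop :=
  -(content.toList.length : Int) ≤ idx
instance (content : String) (idx : Int) : Decidable (Pre_find_json_value_end_py content idx) := by
  unfold Pre_find_json_value_end_py; infer_instance

def pvWitness_find_json_value_end_py : String × Int := ("{\"a\": 1}, x", 0)

def Spec_find_json_value_end_py (content : String) (idx : Int) (out : Int) : Prop := out = find_json_value_end_py_alt content idx
instance (content : String) (idx : Int) (out : Int) : Decidable (Spec_find_json_value_end_py content idx out) := by unfold Spec_find_json_value_end_py; infer_instance

-- ===== CLAIM =====
def Claim_equal_find_json_value_end_py : Prop := ∀ (content : String) (idx : Int), Dom_find_json_value_end_py content idx → Pre_find_json_value_end_py content idx → Spec_find_json_value_end_py content idx (find_json_value_end_py content idx)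

-- ===== LEMMAS AND PROOFS =====

-- A's string state (in_string, escape) encoded as B's tokenizer state
def encSt (instr esc : Bool) : Int := if instr then (if esc then 2 else 1) else 0

lemma pyGet?_isSome (cs : List Char) (pos : Int)
    (h1 : -(cs.length : Int) ≤ pos) (h2 : pos < (cs.length : Int)) :
    ∃ ch, PySem.List.pyGet? cs pos = some ch := by
  cases hg : PySem.List.pyGet? cs pos with
  | none =>
    rw [PySem.List.pyGet?_eq_none_iff] at hg
    exact absurd ⟨h1, h2⟩ hg
  | some ch => exact ⟨ch, rfl⟩

-- main invariant: A's intertwined scan equals B's fold applied to the tokenizer's output,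
-- for every string state and every pair of depths, in fuel lockstep.
lemma main_inv (cs : List Char) :
    ∀ (f : Nat) (pos dc ds : Int) (instr esc : Bool), -(cs.length : Int) ≤ pos →
      aLoop cs (cs.length : Int) f pos dc ds instr esc =
        bFold (cs.length : Int) (bScan cs (cs.length : Int) f pos (encSt instr esc)) dc ds := by
  intro f
  induction f with
  | zero => intro pos dc ds instr esc _; simp [aLoop, bScan, bFold]
  | succ g IH =>
    intro pos dc ds instr esc hlo
    set n : Int := (cs.length : Int) with hn
    by_cases hp : pos < n
    · obtain ⟨ch, hg⟩ := pyGet?_isSome cs pos hlo hp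
      have hlo1 : -(cs.length : Int) ≤ pos + 1 := by omega
      rw [aLoop, bScan]
      simp only [if_pos hp, hg]
      cases instr with
      | true =>
        cases esc with
        | true =>
          simp only [encSt, reduceIte]
          exact IH (pos+1) dc ds true false hlo1
        | false =>
          simp only [encSt]
          norm_num
          split_ifs with h1 h2
          · exact IH (pos+1) dc ds true true hlo1
          · exact IH (pos+1) dc ds false false hlo1
          · exact IH (pos+1) dc ds true false hlo1
      | false =>
        simp only [encSt]
        norm_num
        by_cases c1 : ch = '"'
        · simp only [if_pos c1]; exact IH (pos+1) dc ds true false hlo1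
        · simp only [if_neg c1]
          by_cases c2 : ch = '{'
          · subst c2
            simp only [bFold, reduceIte, true_or]
            exact IH (pos+1) (dc+1) ds false false hlo1
          · simp only [if_neg c2]
            by_cases c3 : ch = '}'
            · subst c3
              simp only [bFold, reduceIte, true_or, or_true]
              by_cases hd : dc = 0 ∧ ds = 0
              · simp [hd]
              · simp only [if_neg hd]
                exact IH (pos+1) (max 0 (dc-1)) ds false false hlo1
            · simp only [if_neg c3]
              by_cases c4 : ch = '['
              · subst c4
                simp only [bFold, reduceIte, true_or, or_true]
                exact IH (pos+1) dc (ds+1) false false hlo1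
              · simp only [if_neg c4]
                by_cases c5 : ch = ']'
                · subst c5
                  simp only [bFold, reduceIte, true_or, or_true]
                  exact IH (pos+1) dc (max 0 (ds-1)) false false hlo1
                · simp only [if_neg c5]
                  by_cases c6 : ch = ','
                  · subst c6
                    simp only [bFold, reduceIte, or_true, true_and]
                    by_cases hd : dc = 0 ∧ ds = 0
                    · simp [hd]
                    · simp only [if_neg hd]
                      exact IH (pos+1) dc ds false false hlo1
                  · have hnot : ¬ (ch = '{' ∨ ch = '}' ∨ ch = '[' ∨ ch = ']' ∨ ch = ',') := by
                      simp [c2, c3, c4, c5, c6]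
                    have hcond : ¬ (ch = ',' ∧ dc = 0 ∧ ds = 0) := by simp [c6]
                    simp only [if_neg hcond, if_neg hnot]
                    exact IH (pos+1) dc ds false false hlo1
    · rw [aLoop, bScan]
      simp [hp, bFold]

-- ===== VERDICT =====
theorem find_json_value_end_py_spec : Claim_equal_find_json_value_end_py := by
  intro content idx _ hpre
  unfold Spec_find_json_value_end_py find_json_value_end_py find_json_value_end_py_alt
  exact main_inv content.toList ((content.toList.length : Int) - idx).toNat idx 0 0 false false hpre
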